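-- pv_equiv track=rewrite | github.com/BrettRey/erdos-problem-993 | conjecture_a_decimated_bridge_diagnostics.py | decode_subset
-- ===== SOURCE A (Python) =====
-- def decode_subset(mask: int, nodes: list[int]) -> list[int]:
--     out: list[int] = []
--     rem = mask
--     while rem:
--         bit = rem & -rem
--         i = bit.bit_length() - 1
--         rem ^= bit
--         out.append(nodes[i])
--     return out
-- ===== SOURCE B (Python) =====
-- def decode_subset(mask: int, nodes: list[int]) -> list[int]:
--     return [nodes[i] for i in range(mask.bit_length()) if (mask >> i) & 1]
-- ===== Notes on version B (the rewrite author's own statement) =====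
-- stated objective: idiomatic
-- what changed: B scans bit positions 0..bit_length-1 with shift-and-test in a comprehension instead of A's while-loop that repeatedly isolates the lowest set bit with rem & -rem, takes its bit_length, and clears it with xor.
import Mathlib
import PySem

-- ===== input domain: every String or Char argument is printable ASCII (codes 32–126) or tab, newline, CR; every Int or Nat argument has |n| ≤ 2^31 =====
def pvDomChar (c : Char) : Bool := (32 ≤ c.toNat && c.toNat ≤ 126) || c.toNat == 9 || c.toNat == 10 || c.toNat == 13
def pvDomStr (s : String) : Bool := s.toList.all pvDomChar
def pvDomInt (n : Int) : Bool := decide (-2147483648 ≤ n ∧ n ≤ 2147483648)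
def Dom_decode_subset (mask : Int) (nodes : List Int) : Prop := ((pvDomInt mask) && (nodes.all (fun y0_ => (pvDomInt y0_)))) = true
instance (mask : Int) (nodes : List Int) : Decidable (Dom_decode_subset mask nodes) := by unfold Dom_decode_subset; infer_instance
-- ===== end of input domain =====

-- B decodes the bitmask by scanning positions 0..bit_length-1 with shift-and-test (idiomatic
-- comprehension) instead of A's lowest-set-bit isolation loop; same return value on Pre_.

-- ===== PORT A =====
-- while rem: bit = rem & -rem; i = bit.bit_length() - 1; rem ^= bit; out.append(nodes[i])
-- fuel only makes the recursion structural (each iteration strictly decreases a nonnegative rem);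
-- on IndexError (pyGet? = none, excluded by Pre_) the loop stops.
def decodeLoop (nodes : List Int) : Nat → Int → List Int → List Int
  | 0, _, out => out
  | fuel+1, rem, out =>
    if rem = 0 then out
    else
      let bit := PySem.Int.band rem (-rem)
      let i : Int := (PySem.Int.bitLength bit : Int) - 1
      let rem' := PySem.Int.bxor rem bit
      match PySem.List.pyGet? nodes i with
      | some v => decodeLoop nodes fuel rem' (out ++ [v])
      | none => out

def decode_subset (mask : Int) (nodes : List Int) : List Int :=
  decodeLoop nodes (mask.natAbs + 1) mask []

-- ===== PORT B =====
-- [nodes[i] for i in range(mask.bit_length()) if (mask >> i) & 1]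
def decode_subset_alt (mask : Int) (nodes : List Int) : List Int :=
  (List.range (PySem.Int.bitLength mask)).filterMap
    (fun (i : Nat) => if PySem.Int.band (mask >>> i) 1 = 1 then PySem.List.pyGet? nodes (i : Int) else none)

-- ===== PRECONDITION & SPEC =====
-- Exactly the inputs where the Python A returns: mask ≥ 0 (a negative mask loops until IndexError)
-- and every set bit's index below len(nodes), i.e. mask < 2^len(nodes) (otherwise IndexError).
def Pre_decode_subset (mask : Int) (nodes : List Int) : Prop :=
  0 ≤ mask ∧ mask < 2 ^ nodes.length
instance (mask : Int) (nodes : List Int) : Decidable (Pre_decode_subset mask nodes) := by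
  unfold Pre_decode_subset; infer_instance

def pvWitness_decode_subset : Int × List Int := (5, [10, 20, 30])

def Spec_decode_subset (mask : Int) (nodes : List Int) (out : List Int) : Prop :=
  out = decode_subset_alt mask nodes
instance (mask : Int) (nodes : List Int) (out : List Int) : Decidable (Spec_decode_subset mask nodes out) := by
  unfold Spec_decode_subset; infer_instance

-- ===== CLAIM (what is proved, stated in full; the proofs are below) =====
def Claim_equal_decode_subset : Prop := ∀ (mask : Int) (nodes : List Int),
  Dom_decode_subset mask nodes → Pre_decode_subset mask nodes →
  Spec_decode_subset mask nodes (decode_subset mask nodes)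

-- ===== LEMMAS AND PROOFS =====

-- lowest set bit of n (as a value) and its index, by the halving recursion
def lowbitN : Nat → Nat
  | 0 => 0
  | n+1 => if (n+1) % 2 = 1 then 1 else 2 * lowbitN ((n+1)/2)

def idxN : Nat → Nat
  | 0 => 0
  | n+1 => if (n+1) % 2 = 1 then 0 else idxN ((n+1)/2) + 1

-- reference: bits of n in ascending index order, mapped through nodes
def ref : Nat → List Int → List Int
  | 0, _ => []
  | n+1, nodes => (if (n+1) % 2 = 1 then [nodes.getD 0 0] else []) ++ ref ((n+1)/2) nodes.tail

theorem lowbitN_eq (n : Nat) (h : 0 < n) :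
    lowbitN n = if n % 2 = 1 then 1 else 2 * lowbitN (n/2) := by
  cases n with
  | zero => omega
  | succ m => simp [lowbitN]

theorem idxN_eq (n : Nat) (h : 0 < n) :
    idxN n = if n % 2 = 1 then 0 else idxN (n/2) + 1 := by
  cases n with
  | zero => omega
  | succ m => simp [idxN]

theorem ref_eq (n : Nat) (nodes : List Int) (h : 0 < n) :
    ref n nodes = (if n % 2 = 1 then [nodes.getD 0 0] else []) ++ ref (n/2) nodes.tail := by
  cases n with
  | zero => omega
  | succ m => simp [ref]

theorem lowbitN_le (n : Nat) : lowbitN n ≤ n := by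
  induction n using Nat.strong_induction_on with
  | _ n IH =>
    rcases Nat.eq_zero_or_pos n with rfl | hn
    · simp [lowbitN]
    · rw [lowbitN_eq n hn]
      split_ifs with hpar
      · omega
      · have := IH (n/2) (by omega)
        omega

theorem lowbitN_pos (n : Nat) (h : 0 < n) : 0 < lowbitN n := by
  induction n using Nat.strong_induction_on with
  | _ n IH =>
    rw [lowbitN_eq n h]
    split_ifs with hpar
    · omega
    · have := IH (n/2) (by omega) (by omega)
      omega

-- halving identities for the bitwise operators, from Mathlib's `bit` lemmas
theorem land_odd_even (a b : Nat) : (2*a+1) &&& (2*b) = 2*(a &&& b) := by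
  simpa [Nat.bit] using Nat.land_bit true a false b

theorem land_even_odd (a b : Nat) : (2*a) &&& (2*b+1) = 2*(a &&& b) := by
  simpa [Nat.bit] using Nat.land_bit false a true b

theorem xor_two_mul (a b : Nat) : (2*a) ^^^ (2*b) = 2*(a ^^^ b) := by
  simpa [Nat.bit] using Nat.xor_bit false a false b

-- n & (n-1) clears the lowest set bit
theorem land_pred_eq (n : Nat) (h : 0 < n) : n &&& (n-1) = n - lowbitN n := by
  induction n using Nat.strong_induction_on with
  | _ n IH =>
    rcases Nat.even_or_odd' n with ⟨m, hm | hm⟩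
    · subst hm
      have hm0 : 0 < m := by omega
      have h1 : 2*m - 1 = 2*(m-1) + 1 := by omega
      rw [h1, land_even_odd m (m-1), IH m (by omega) hm0,
          lowbitN_eq (2*m) (by omega)]
      have h2 : ¬ ((2*m) % 2 = 1) := by omega
      have h3 : 2*m/2 = m := by omega
      rw [if_neg h2, h3]
      have := lowbitN_le m
      have := lowbitN_pos m hm0
      omega
    · subst hm
      have h1 : 2*m+1-1 = 2*m := rfl
      rw [h1, land_odd_even m m, Nat.and_self, lowbitN_eq (2*m+1) (by omega)]
      have h2 : (2*m+1) % 2 = 1 := by omega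
      rw [if_pos h2]
      omega

-- xor with the lowest set bit subtracts it
theorem xor_lowbitN (n : Nat) (h : 0 < n) : n ^^^ lowbitN n = n - lowbitN n := by
  induction n using Nat.strong_induction_on with
  | _ n IH =>
    rcases Nat.even_or_odd' n with ⟨m, hm | hm⟩
    · subst hm
      have hm0 : 0 < m := by omega
      rw [lowbitN_eq (2*m) (by omega)]
      have h2 : ¬ ((2*m) % 2 = 1) := by omega
      have h3 : 2*m/2 = m := by omega
      rw [if_neg h2, h3, xor_two_mul m (lowbitN m), IH m (by omega) hm0]
      have := lowbitN_le m
      omega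
    · subst hm
      rw [lowbitN_eq (2*m+1) (by omega)]
      have h2 : (2*m+1) % 2 = 1 := by omega
      rw [if_pos h2, Nat.xor_one_of_odd ⟨m, by omega⟩]

theorem lowbitN_pow (n : Nat) (h : 0 < n) : lowbitN n = 2 ^ idxN n := by
  induction n using Nat.strong_induction_on with
  | _ n IH =>
    rcases Nat.even_or_odd' n with ⟨m, hm | hm⟩
    · subst hm
      have hm0 : 0 < m := by omega
      rw [lowbitN_eq (2*m) (by omega), idxN_eq (2*m) (by omega)]
      have h2 : ¬ ((2*m) % 2 = 1) := by omega
      have h3 : 2*m/2 = m := by omega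
      rw [if_neg h2, if_neg h2, h3, IH m (by omega) hm0, pow_succ]
      ring
    · subst hm
      rw [lowbitN_eq (2*m+1) (by omega), idxN_eq (2*m+1) (by omega)]
      have h2 : (2*m+1) % 2 = 1 := by omega
      rw [if_pos h2, if_pos h2, pow_zero]

theorem idxN_lt (n : Nat) (L : Nat) (h : 0 < n) (hlt : n < 2^L) : idxN n < L := by
  by_contra hc
  have h1 : 2^L ≤ 2^idxN n := Nat.pow_le_pow_right (by omega) (by omega)
  have h2 : 2^idxN n ≤ n := by
    rw [← lowbitN_pow n h]; exact lowbitN_le n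
  omega

-- bit_length of a power of two
theorem bitLength_pow (k : Nat) : PySem.Int.bitLength ((2^k : Nat) : Int) = k + 1 := by
  induction k with
  | zero => decide
  | succ k IH =>
    rw [PySem.Int.bitLength_natCast (Nat.two_pow_pos _)]
    have h : 2^(k+1)/2 = 2^k := by rw [pow_succ]; omega
    rw [h, IH]

-- one step of the reference list: head is nodes[idxN n], tail drops the lowest set bit
theorem ref_step : ∀ n : Nat, ∀ nodes : List Int, 0 < n → n < 2^nodes.length →
    ref n nodes = nodes.getD (idxN n) 0 :: ref (n - lowbitN n) nodes := by
  intro n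
  induction n using Nat.strong_induction_on with
  | _ n IH =>
    intro nodes h hlt
    rcases Nat.even_or_odd' n with ⟨m, hm | hm⟩
    · subst hm
      have hm0 : 0 < m := by omega
      obtain ⟨x, t, rfl⟩ : ∃ x t, nodes = x :: t := by
        cases nodes with
        | nil => simp at hlt; omega
        | cons x t => exact ⟨x, t, rfl⟩
      have h2 : ¬ ((2*m) % 2 = 1) := by omega
      have h3 : 2*m/2 = m := by omega
      have hmlt : m < 2^t.length := by
        simp only [List.length_cons, pow_succ] at hlt
        omega
      have hidxe : idxN (2*m) = idxN m + 1 := by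
        rw [idxN_eq (2*m) (by omega), if_neg h2, h3]
      have hlow : lowbitN (2*m) = 2 * lowbitN m := by
        rw [lowbitN_eq (2*m) (by omega), if_neg h2, h3]
      rw [ref_eq (2*m) (x :: t) (by omega), if_neg h2, List.nil_append, h3, List.tail_cons,
          IH m (by omega) t hm0 hmlt, hidxe, hlow, List.getD_cons_succ]
      congr 1
      have hle := lowbitN_le m
      rcases Nat.eq_zero_or_pos (m - lowbitN m) with hz | hp
      · have hz2 : 2*m - 2*lowbitN m = 0 := by omega
        rw [hz, hz2]
        simp [ref]
      · have h4 : 2*m - 2*lowbitN m = 2*(m - lowbitN m) := by omega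
        have h5 : ¬ ((2*(m - lowbitN m)) % 2 = 1) := by omega
        have h6 : 2*(m - lowbitN m)/2 = m - lowbitN m := by omega
        rw [h4, ref_eq (2*(m - lowbitN m)) (x :: t) (by omega), if_neg h5,
            List.nil_append, h6, List.tail_cons]
    · subst hm
      have h2 : (2*m+1) % 2 = 1 := by omega
      have h3 : (2*m+1)/2 = m := by omega
      have hidx : idxN (2*m+1) = 0 := by rw [idxN_eq (2*m+1) (by omega), if_pos h2]
      have hlow : lowbitN (2*m+1) = 1 := by rw [lowbitN_eq (2*m+1) (by omega), if_pos h2]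
      rw [ref_eq (2*m+1) nodes (by omega), if_pos h2, h3, hidx, hlow,
          List.singleton_append]
      congr 1
      rcases Nat.eq_zero_or_pos m with rfl | hm0
      · simp [ref]
      · have h1 : 2*m+1-1 = 2*m := rfl
        have h5 : ¬ ((2*m) % 2 = 1) := by omega
        have h6 : 2*m/2 = m := by omega
        rw [h1, ref_eq (2*m) nodes (by omega), if_neg h5, List.nil_append, h6]

-- A's loop computes the reference list
theorem loop_eq (nodes : List Int) : ∀ n : Nat, ∀ fuel : Nat, ∀ out : List Int,
    n ≤ fuel → n < 2^nodes.length →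
    decodeLoop nodes fuel ((n : Nat) : Int) out = out ++ ref n nodes := by
  intro n
  induction n using Nat.strong_induction_on with
  | _ n IH =>
    intro fuel out hf hlt
    rcases Nat.eq_zero_or_pos n with rfl | hn
    · cases fuel with
      | zero => simp [decodeLoop, ref]
      | succ f => simp [decodeLoop, ref]
    · obtain ⟨f, rfl⟩ : ∃ f, fuel = f + 1 := ⟨fuel - 1, by omega⟩
      have hne : ((n : Nat) : Int) ≠ 0 := by exact_mod_cast (by omega : n ≠ 0)
      have hband : PySem.Int.band ((n:Nat):Int) (-((n:Nat):Int)) = ((lowbitN n : Nat) : Int) := by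
        have hpos : (0:Int) ≤ ((n:Nat):Int) := by positivity
        have hneg : ¬ (0:Int) ≤ -((n:Nat):Int) := by
          simp only [not_le]
          omega
        simp only [PySem.Int.band, if_pos hpos, if_neg hneg]
        have h1 : (((n:Nat):Int)).toNat = n := by omega
        have h2 : (-(-((n:Nat):Int)) - 1).toNat = n - 1 := by omega
        rw [h1, h2, land_pred_eq n hn]
        have := lowbitN_le n
        congr 1
        omega
      have hxor : PySem.Int.bxor ((n:Nat):Int) ((lowbitN n : Nat) : Int)
          = ((n - lowbitN n : Nat) : Int) := by
        rw [PySem.Int.bxor_natCast, xor_lowbitN n hn]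
      have hbl : PySem.Int.bitLength ((lowbitN n : Nat) : Int) = idxN n + 1 := by
        rw [lowbitN_pow n hn, bitLength_pow]
      have hidx : idxN n < nodes.length := idxN_lt n nodes.length hn hlt
      have hget : PySem.List.pyGet? nodes (((idxN n + 1 : Nat) : Int) - 1)
          = some (nodes.getD (idxN n) 0) := by
        have hcast : ((idxN n + 1 : Nat) : Int) - 1 = ((idxN n : Nat) : Int) := by push_cast; ring
        rw [hcast, PySem.List.pyGet?_natCast, List.getElem?_eq_getElem hidx,
            List.getD_eq_getElem nodes 0 hidx]
      have step : decodeLoop nodes (f+1) ((n:Nat):Int) out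
          = decodeLoop nodes f ((n - lowbitN n : Nat) : Int) (out ++ [nodes.getD (idxN n) 0]) := by
        simp only [decodeLoop, if_neg hne, hband, hbl, hxor, hget]
      rw [step]
      have hlow_pos := lowbitN_pos n hn
      have hlow_le := lowbitN_le n
      rw [IH (n - lowbitN n) (by omega) f _ (by omega) (by omega)]
      rw [ref_step n nodes hn hlt]
      simp

-- casting shifts through ℤ
theorem int_natCast_shiftRight (m k : Nat) : ((m : Nat) : Int) >>> k = ((m >>> k : Nat) : Int) := by
  rfl

-- B's scan computes the reference list
theorem alt_eq : ∀ n : Nat, ∀ nodes : List Int, n < 2^nodes.length →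
    decode_subset_alt ((n : Nat) : Int) nodes = ref n nodes := by
  intro n
  induction n using Nat.strong_induction_on with
  | _ n IH =>
    intro nodes hlt
    rcases Nat.eq_zero_or_pos n with rfl | hn
    · simp [decode_subset_alt, ref, PySem.Int.bitLength_zero]
    · obtain ⟨x, t, rfl⟩ : ∃ x t, nodes = x :: t := by
        cases nodes with
        | nil => simp at hlt; omega
        | cons x t => exact ⟨x, t, rfl⟩
      have hmlt : n/2 < 2^t.length := by
        simp only [List.length_cons, pow_succ] at hlt
        omega
      have hbl : PySem.Int.bitLength ((n:Nat):Int) = PySem.Int.bitLength ((n/2 : Nat):Int) + 1 :=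
        PySem.Int.bitLength_natCast hn
      have hcond : ∀ m : Nat, (PySem.Int.band (((m:Nat):Int) >>> (0:Nat)) 1 = 1) ↔ m % 2 = 1 := by
        intro m
        rw [int_natCast_shiftRight, show (1:Int) = ((1:Nat):Int) from rfl,
            PySem.Int.band_natCast, Nat.and_one_is_mod]
        have h0 : m >>> 0 = m := rfl
        rw [h0]
        exact_mod_cast Iff.rfl
      have hsucc : ∀ i : Nat,
          (if PySem.Int.band (((n:Nat):Int) >>> (i+1)) 1 = 1
             then PySem.List.pyGet? (x :: t) ((i+1 : Nat) : Int) else none)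
          = (if PySem.Int.band (((n/2 : Nat):Int) >>> i) 1 = 1
             then PySem.List.pyGet? t ((i : Nat) : Int) else none) := by
        intro i
        have hshift : ((n:Nat):Int) >>> (i+1) = ((n/2:Nat):Int) >>> i := by
          rw [int_natCast_shiftRight, int_natCast_shiftRight]
          congr 1
          rw [Nat.shiftRight_eq_div_pow, Nat.shiftRight_eq_div_pow, pow_succ,
              Nat.div_div_eq_div_mul, mul_comm]
        have hgetc : PySem.List.pyGet? (x :: t) ((i+1 : Nat) : Int)
            = PySem.List.pyGet? t ((i : Nat) : Int) := by
          rw [PySem.List.pyGet?_natCast, PySem.List.pyGet?_natCast, List.getElem?_cons_succ]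
        rw [hshift, hgetc]
      unfold decode_subset_alt
      rw [hbl, List.range_succ_eq_map, List.filterMap_cons, List.filterMap_map]
      have hrest : List.filterMap
          ((fun (i : Nat) => if PySem.Int.band (((n:Nat):Int) >>> i) 1 = 1
              then PySem.List.pyGet? (x :: t) ((i:Nat) : Int) else none) ∘ Nat.succ)
          (List.range (PySem.Int.bitLength ((n/2:Nat):Int)))
          = ref (n/2) t := by
        have hfun : ((fun (i : Nat) => if PySem.Int.band (((n:Nat):Int) >>> i) 1 = 1
              then PySem.List.pyGet? (x :: t) ((i:Nat) : Int) else none) ∘ Nat.succ)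
            = fun (i : Nat) => if PySem.Int.band (((n/2:Nat):Int) >>> i) 1 = 1
              then PySem.List.pyGet? t ((i:Nat) : Int) else none := by
          funext i
          exact hsucc i
        rw [hfun]
        exact IH (n/2) (by omega) t hmlt
      rw [ref_eq n (x :: t) hn]
      simp only [List.tail_cons, List.getD_cons_zero]
      rcases Nat.even_or_odd' n with ⟨m, hm | hm⟩
      · have hc : ¬ (PySem.Int.band (((n:Nat):Int) >>> (0:Nat)) 1 = 1) := by
          rw [hcond n]; omega
        have h2 : ¬ (n % 2 = 1) := by omega
        rw [if_neg hc, if_neg h2, List.nil_append]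
        exact hrest
      · have hc : PySem.Int.band (((n:Nat):Int) >>> (0:Nat)) 1 = 1 := by
          rw [hcond n]; omega
        have h2 : n % 2 = 1 := by omega
        have hget0 : PySem.List.pyGet? (x :: t) ((0 : Nat) : Int) = some x := by
          rw [PySem.List.pyGet?_natCast]; rfl
        rw [if_pos hc, hget0, if_pos h2, List.singleton_append, hrest]

-- ===== VERDICT (by name: the statement is the Claim_ definition above) =====
theorem decode_subset_spec : Claim_equal_decode_subset := by
  unfold Claim_equal_decode_subset
  intro mask nodes _ hpre
  obtain ⟨h0, hlt⟩ := hpre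
  unfold Spec_decode_subset
  have hm : mask = ((mask.toNat : Nat) : Int) := (Int.toNat_of_nonneg h0).symm
  have hlt' : mask.toNat < 2 ^ nodes.length := by
    have h : ((mask.toNat : Nat) : Int) < ((2 ^ nodes.length : Nat) : Int) := by
      rw [← hm]; push_cast; exact hlt
    exact_mod_cast h
  rw [hm]
  unfold decode_subset
  have hnat : (((mask.toNat : Nat) : Int)).natAbs = mask.toNat := by omega
  rw [hnat, loop_eq nodes mask.toNat (mask.toNat + 1) [] (by omega) hlt',
      alt_eq mask.toNat nodes hlt']
  simp
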